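-- pv_equiv track=rewrite | github.com/RuiFSP/CodeWars | Python/6 kyu/largest_radial_sum.py | largest_radial_sum
-- ===== SOURCE A (Python) =====
-- def largest_radial_sum(arr:list, d:int) -> int:
--     n = len(arr)
--     max_sum = float('-inf')
--
--     for i in range(n):
--         current_sum = 0
--
--         for j in range(d):
--             index = (i + j * (n // d)) % n  # Calculate the index of the person
--             current_sum += arr[index]  # Add their honor to the current sum
--
--         max_sum = max(max_sum, current_sum)  # Update the maximum sum if needed
--
--     return max_sum
-- ===== SOURCE B (Python) =====
-- def largest_radial_sum(arr: list, d: int) -> int: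
--     n = len(arr)
--     if d <= 0:
--         return 0
--     step = n // d
--     if step == 0:
--         # every index collapses to i itself, so each radial sum is d * arr[i]
--         return max(d * x for x in arr)
--     sums = []
--     for i in range(step):
--         sums.append(sum(arr[(i + j * step) % n] for j in range(d)))
--     best = max(sums)
--     for i in range(step, n):
--         s = sums[i - step] - arr[i - step] + arr[(i - step + d * step) % n]
--         sums.append(s)
--         if s > best:
--             best = s
--     return best
-- ===== Notes on version B (the rewrite author's own statement) =====
-- stated objective: faster
-- what changed: A recomputes each of the n radial sums with an inner loop of d strided reads (O(n*d)); B computes only the first step=n//d sums directly and derives every other sum in O(1) via the sliding recurrence sum(i)=sum(i-step)-arr[i-step]+arr[(i-step+d*step)%n], handling d<=0 and step==0 by closed forms.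
-- outside the precondition, e.g. on largest_radial_sum([], 3): A returns -inf, B raises ValueError; on largest_radial_sum([], 0): A returns -inf, B returns 0
import Mathlib
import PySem

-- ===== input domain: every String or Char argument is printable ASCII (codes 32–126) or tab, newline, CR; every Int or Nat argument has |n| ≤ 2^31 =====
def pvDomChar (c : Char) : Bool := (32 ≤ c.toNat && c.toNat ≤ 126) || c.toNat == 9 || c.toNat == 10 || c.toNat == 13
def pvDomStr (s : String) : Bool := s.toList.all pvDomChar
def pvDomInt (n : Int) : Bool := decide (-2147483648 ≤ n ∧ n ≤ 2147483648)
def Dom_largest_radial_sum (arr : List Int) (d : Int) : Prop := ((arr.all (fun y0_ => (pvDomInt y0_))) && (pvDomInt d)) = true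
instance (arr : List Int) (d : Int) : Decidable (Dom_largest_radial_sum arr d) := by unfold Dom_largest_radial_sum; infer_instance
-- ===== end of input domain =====

-- B replaces A's O(n*d) double loop by the O(n+d) sliding recurrence
-- sum(i) = sum(i-step) - arr[i-step] + arr[(i-step+d*step)%n]; objective: faster (asymptotic).

-- ===== PORT A =====
-- All indices are (…) % n ∈ [0, n), in range under Pre_ (arr ≠ []), so pyGetD's default is never used.
def largest_radial_sum (arr : List Int) (d : Int) : Int :=
  let n : Int := PySem.List.len arr
  -- max_sum = float('-inf') is modelled as (none : Option Int); Pre_ (arr ≠ []) guarantees the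
  -- final value is some _, so the final .getD 0 is never the answer Python gives.
  let r : Option Int := (PySem.List.pyRange 0 n 1).foldl
    (fun maxSum i =>
      let currentSum : Int := (PySem.List.pyRange 0 d 1).foldl
        (fun cs j => cs + PySem.List.pyGetD arr (PySem.Int.mod (i + j * PySem.Int.floordiv n d) n) 0) 0
      match maxSum with
      | none => some currentSum
      | some m => some (max m currentSum)) none
  r.getD 0

-- ===== PORT B =====
-- Same indexing note as for A: all indices are in range under Pre_ (arr ≠ []);
-- max(...) over a nonempty collection is max? …, with .getD 0 never used under Pre_.
def largest_radial_sum_alt (arr : List Int) (d : Int) : Int :=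
  let n : Int := PySem.List.len arr
  if d ≤ 0 then 0
  else
    let step : Int := PySem.Int.floordiv n d
    if step = 0 then
      (PySem.List.max? (arr.map (fun x => d * x)) (fun y => y)).getD 0
    else
      let sums0 : List Int := (PySem.List.pyRange 0 step 1).foldl
        (fun sums i => sums ++
          [((PySem.List.pyRange 0 d 1).map
              (fun j => PySem.List.pyGetD arr (PySem.Int.mod (i + j * step) n) 0)).sum]) []
      let best0 : Int := (PySem.List.max? sums0 (fun y => y)).getD 0
      let res : List Int × Int := (PySem.List.pyRange step n 1).foldl
        (fun st i =>
          let s : Int := PySem.List.pyGetD st.1 (i - step) 0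
                         - PySem.List.pyGetD arr (i - step) 0
                         + PySem.List.pyGetD arr (PySem.Int.mod (i - step + d * step) n) 0
          (st.1 ++ [s], if s > st.2 then s else st.2)) (sums0, best0)
      res.2

-- ===== PRECONDITION & SPEC =====
-- Pre_ excludes only the empty list, on which A returns float('-inf'), not an int.
def Pre_largest_radial_sum (arr : List Int) (d : Int) : Prop := arr ≠ []
instance (arr : List Int) (d : Int) : Decidable (Pre_largest_radial_sum arr d) := by
  unfold Pre_largest_radial_sum; infer_instance

def pvWitness_largest_radial_sum : List Int × Int := ([3, -1, 4, 1, 5, -9], 3)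

def Spec_largest_radial_sum (arr : List Int) (d : Int) (out : Int) : Prop := out = largest_radial_sum_alt arr d
instance (arr : List Int) (d : Int) (out : Int) : Decidable (Spec_largest_radial_sum arr d out) := by unfold Spec_largest_radial_sum; infer_instance

-- ===== CLAIM (what is proved, stated in full; the proofs are below) =====
def Claim_equal_largest_radial_sum : Prop := ∀ (arr : List Int) (d : Int), Dom_largest_radial_sum arr d → Pre_largest_radial_sum arr d → Spec_largest_radial_sum arr d (largest_radial_sum arr d)

-- ===== LEMMAS AND PROOFS =====

def lrsF (arr : List Int) (k : Int) : Int := PySem.List.pyGetD arr k 0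

def lrsS (arr : List Int) (d step i : Int) : Int :=
  ((PySem.List.pyRange 0 d 1).map
    (fun j => lrsF arr (PySem.Int.mod (i + j * step) ((arr.length : Int))))).sum

theorem lrs_sum_range_shift (g : ℕ → Int) (D : ℕ) :
    ((List.range D).map (fun k => g (k + 1))).sum = ((List.range D).map g).sum + g D - g 0 := by
  have h1 : ((List.range (D + 1)).map g).sum = ((List.range D).map g).sum + g D := by
    rw [List.range_succ]; simp
  have h2 : ((List.range (D + 1)).map g).sum
      = g 0 + ((List.range D).map (fun k => g (k + 1))).sum := by
    rw [List.range_succ_eq_map]; simp [List.map_map, Function.comp_def]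
  linarith

theorem lrsS_rec (arr : List Int) (d step i : Int) (hd : 1 ≤ d)
    (hi0 : 0 ≤ i) (hin : i < (arr.length : Int)) :
    lrsS arr d step (i + step)
      = lrsS arr d step i - lrsF arr i
        + lrsF arr (PySem.Int.mod (i + d * step) ((arr.length : Int))) := by
  have hn : (0 : Int) < (arr.length : Int) := lt_of_le_of_lt hi0 hin
  have hD : ((d.toNat : Int)) = d := Int.toNat_of_nonneg (by omega)
  have hmodi : PySem.Int.mod i ((arr.length : Int)) = i := by
    rw [PySem.Int.mod_eq_emod_of_pos hn, Int.emod_eq_of_lt hi0 hin]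
  simp only [lrsS, PySem.List.pyRange_one, List.map_map, Int.sub_zero, Function.comp_def,
    zero_add]
  set g : ℕ → Int := fun k => lrsF arr (PySem.Int.mod (i + (k : Int) * step) ((arr.length : Int))) with hg
  have hlhs : (fun (k : ℕ) => lrsF arr (PySem.Int.mod (i + step + (k : Int) * step) ((arr.length : Int))))
      = fun k => g (k + 1) := by
    funext k; simp only [hg]; push_cast; ring_nf
  rw [hlhs, lrs_sum_range_shift]
  have h0 : g 0 = lrsF arr i := by simp [hg, hmodi]
  have hDv : g d.toNat = lrsF arr (PySem.Int.mod (i + d * step) ((arr.length : Int))) := by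
    simp only [hg, hD]
  rw [h0, hDv]; ring

def lrsM : List Int → Int
  | [] => 0
  | x :: t => t.foldl max x

theorem lrs_opt_foldl (g : Int → Int) (l : List Int) (a : Int) :
    l.foldl (fun acc i => match acc with
      | none => some (g i)
      | some m => some (max m (g i))) (some a)
    = some ((l.map g).foldl max a) := by
  induction l generalizing a with
  | nil => rfl
  | cons x t ih => simp [List.foldl, ih]

theorem lrs_opt_foldl_none (g : Int → Int) (x : Int) (t : List Int) :
    (x :: t).foldl (fun acc i => match acc with
      | none => some (g i)
      | some m => some (max m (g i))) none
    = some (lrsM ((x :: t).map g)) := by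
  simp only [List.foldl, List.map, lrsM]
  rw [lrs_opt_foldl]

theorem lrsA_eq (arr : List Int) (d : Int) (h : arr ≠ []) :
    largest_radial_sum arr d
      = lrsM (((PySem.List.pyRange 0 ((arr.length : Int)) 1)).map
          (lrsS arr d (PySem.Int.floordiv ((arr.length : Int)) d))) := by
  have hn : (0 : Int) < (arr.length : Int) := by
    have := List.length_pos_iff.mpr h; exact_mod_cast this
  simp only [largest_radial_sum, PySem.List.len_eq]
  have hbody : (fun (maxSum : Option Int) (i : Int) =>
      let currentSum : Int := (PySem.List.pyRange 0 d 1).foldl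
        (fun cs j => cs + PySem.List.pyGetD arr
          (PySem.Int.mod (i + j * PySem.Int.floordiv ((arr.length : Int)) d) ((arr.length : Int))) 0) 0
      match maxSum with
      | none => some currentSum
      | some m => some (max m currentSum))
      = (fun (acc : Option Int) (i : Int) => match acc with
        | none => some (lrsS arr d (PySem.Int.floordiv ((arr.length : Int)) d) i)
        | some m => some (max m (lrsS arr d (PySem.Int.floordiv ((arr.length : Int)) d) i))) := by
    funext acc i
    have hc : (PySem.List.pyRange 0 d 1).foldl
        (fun cs j => cs + PySem.List.pyGetD arr
          (PySem.Int.mod (i + j * PySem.Int.floordiv ((arr.length : Int)) d) ((arr.length : Int))) 0) 0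
        = lrsS arr d (PySem.Int.floordiv ((arr.length : Int)) d) i := by
      rw [PySem.List.foldl_add]
      simp [lrsS, lrsF]
    cases acc <;> simp [hc]
  rw [hbody]
  rw [PySem.List.pyRange_one_cons hn]
  rw [lrs_opt_foldl_none]
  rfl

theorem lrsM_append_singleton (x : Int) (t : List Int) (y : Int) :
    lrsM ((x :: t) ++ [y]) = max (lrsM (x :: t)) y := by
  simp [lrsM, List.foldl_append]

theorem lrsM_eq_max?_getD (xs : List Int) (h : xs ≠ []) :
    lrsM xs = (PySem.List.max? xs (fun y => y)).getD 0 := by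
  cases xs with
  | nil => exact absurd rfl h
  | cons x t => rw [PySem.List.max?_id_cons]; rfl

theorem lrs_foldl_max_all_le (t : List Int) (a : Int) (h : ∀ x ∈ t, x ≤ a) :
    t.foldl max a = a := by
  have h1 := (PySem.List.le_foldl_max t a).1
  rcases PySem.List.foldl_max_mem t a with h2 | h2
  · exact h2
  · exact le_antisymm (h _ h2) h1

-- d <= 0: every radial sum is the empty sum 0, so A returns 0
theorem lrs_case_nonpos (arr : List Int) (d step : Int) (h : arr ≠ []) (hd : d ≤ 0) :
    lrsM (((PySem.List.pyRange 0 ((arr.length : Int)) 1)).map (lrsS arr d step)) = 0 := by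
  have hn : (0 : Int) < (arr.length : Int) := by
    have := List.length_pos_iff.mpr h; exact_mod_cast this
  have hS : ∀ i, lrsS arr d step i = 0 := by
    intro i; simp [lrsS, PySem.List.pyRange_one_eq_nil hd]
  rw [PySem.List.pyRange_one_cons hn]
  simp only [List.map_cons, hS, lrsM]
  apply lrs_foldl_max_all_le
  intro x hx
  rcases List.mem_map.mp hx with ⟨a, _, rfl⟩
  simp [hS]

-- step = 0: every radial sum collapses to d * arr[i]
theorem lrs_case_step0 (arr : List Int) (d : Int) (hd : 1 ≤ d) :
    ((PySem.List.pyRange 0 ((arr.length : Int)) 1)).map (lrsS arr d 0)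
      = (arr.map (fun x => d * x)) := by
  have hcong : ∀ i ∈ PySem.List.pyRange 0 ((arr.length : Int)) 1,
      lrsS arr d 0 i = d * lrsF arr i := by
    intro i hi
    rcases (PySem.List.mem_pyRange_one).mp hi with ⟨hi0, hin⟩
    have hn : (0 : Int) < (arr.length : Int) := lt_of_le_of_lt hi0 hin
    have hmodi : PySem.Int.mod i ((arr.length : Int)) = i := by
      rw [PySem.Int.mod_eq_emod_of_pos hn, Int.emod_eq_of_lt hi0 hin]
    simp only [lrsS, mul_zero, add_zero, hmodi]
    rw [PySem.List.sum_map_const_int]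
    rw [PySem.List.length_pyRange_one]
    simp [Int.toNat_of_nonneg (by omega : (0:Int) ≤ d)]
  rw [List.map_congr_left hcong]
  have : (PySem.List.pyRange 0 ((arr.length : Int)) 1).map (fun i => d * lrsF arr i)
      = ((PySem.List.pyRange 0 ((arr.length : Int)) 1).map (fun i => lrsF arr i)).map
          (fun x => d * x) := by
    simp [List.map_map, Function.comp_def]
  rw [this]
  congr 1
  simpa [lrsF] using PySem.List.map_pyGetD_pyRange_zero' arr (0 : Int)

theorem lrs_if_max (s b : Int) : (if s > b then s else b) = max b s := by
  rw [max_def]; split_ifs <;> omega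

theorem lrsM_push (xs : List Int) (hxs : xs ≠ []) (y : Int) :
    lrsM (xs ++ [y]) = max (lrsM xs) y := by
  cases xs with
  | nil => exact absurd rfl hxs
  | cons x t => exact lrsM_append_singleton x t y

theorem lrs_loop (arr : List Int) (d step : Int) (hd : 1 ≤ d) (hstep : 1 ≤ step)
    (k : ℕ) (hk : step + (k : Int) ≤ (arr.length : Int)) :
    (PySem.List.pyRange step (step + (k : Int)) 1).foldl
      (fun (st : List Int × Int) i =>
        let s : Int := PySem.List.pyGetD st.1 (i - step) 0
                       - PySem.List.pyGetD arr (i - step) 0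
                       + PySem.List.pyGetD arr
                           (PySem.Int.mod (i - step + d * step) ((arr.length : Int))) 0
        (st.1 ++ [s], if s > st.2 then s else st.2))
      ((PySem.List.pyRange 0 step 1).map (lrsS arr d step),
       lrsM ((PySem.List.pyRange 0 step 1).map (lrsS arr d step)))
    = ((PySem.List.pyRange 0 (step + (k : Int)) 1).map (lrsS arr d step),
       lrsM ((PySem.List.pyRange 0 (step + (k : Int)) 1).map (lrsS arr d step))) := by
  induction k with
  | zero =>
    rw [show step + ((0 : ℕ) : Int) = step by simp]
    rw [PySem.List.pyRange_one_eq_nil (le_refl step)]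
    rfl
  | succ k ih =>
    have hcast : step + ((k + 1 : ℕ) : Int) = (step + (k : Int)) + 1 := by push_cast; ring
    rw [hcast] at hk ⊢
    have hk' : step + (k : Int) ≤ (arr.length : Int) := by omega
    rw [PySem.List.pyRange_one_succ_right (by omega : step ≤ step + (k : Int))]
    rw [List.foldl_append, ih hk']
    -- one application of the loop body at i = step + k
    simp only [List.foldl]
    have hknn : (0 : Int) ≤ (k : Int) := by positivity
    have hkn : (k : Int) < (arr.length : Int) := by omega
    have hidx : step + (k : Int) - step = (k : Int) := by ring
    have hget : PySem.List.pyGetD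
        ((PySem.List.pyRange 0 (step + (k : Int)) 1).map (lrsS arr d step)) ((k : Int)) 0
        = lrsS arr d step (k : Int) := by
      exact PySem.List.pyGetD_map_pyRange_of_nonneg (lrsS arr d step) (step + (k : Int))
        ((k : Int)) 0 hknn (by omega)
    have hs : PySem.List.pyGetD
          ((PySem.List.pyRange 0 (step + (k : Int)) 1).map (lrsS arr d step))
          (step + (k : Int) - step) 0
        - PySem.List.pyGetD arr (step + (k : Int) - step) 0
        + PySem.List.pyGetD arr
            (PySem.Int.mod (step + (k : Int) - step + d * step) ((arr.length : Int))) 0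
        = lrsS arr d step (step + (k : Int)) := by
      rw [hidx, hget]
      have := lrsS_rec arr d step ((k : Int)) hd hknn hkn
      rw [show (k : Int) + step = step + (k : Int) by ring] at this
      rw [this]; simp [lrsF]
    simp only [hs]
    have hne : (PySem.List.pyRange 0 (step + (k : Int)) 1).map (lrsS arr d step) ≠ [] := by
      rw [PySem.List.pyRange_one_cons (by omega : (0 : Int) < step + (k : Int))]
      simp
    refine Prod.ext_iff.mpr ⟨?_, ?_⟩
    · rw [PySem.List.pyRange_one_succ_right (by omega : (0 : Int) ≤ step + (k : Int))]
      simp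
    · rw [lrs_if_max, ← lrsM_push _ hne]
      rw [PySem.List.pyRange_one_succ_right (by omega : (0 : Int) ≤ step + (k : Int))]
      simp

theorem largest_radial_sum_eq_alt (arr : List Int) (d : Int) (h : arr ≠ []) :
    largest_radial_sum arr d = largest_radial_sum_alt arr d := by
  have hn : (0 : Int) < (arr.length : Int) := by
    have := List.length_pos_iff.mpr h; exact_mod_cast this
  rw [lrsA_eq arr d h]
  simp only [largest_radial_sum_alt, PySem.List.len_eq]
  by_cases hd0 : d ≤ 0
  · rw [if_pos hd0]
    exact lrs_case_nonpos arr d _ h hd0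
  · rw [if_neg hd0]
    have hd : 1 ≤ d := by omega
    by_cases hs0 : PySem.Int.floordiv ((arr.length : Int)) d = 0
    · rw [if_pos hs0, hs0, lrs_case_step0 arr d hd]
      apply lrsM_eq_max?_getD
      simp [h]
    · rw [if_neg hs0]
      set step : Int := PySem.Int.floordiv ((arr.length : Int)) d with hstepdef
      have hstep0 : 0 ≤ step := by
        rw [hstepdef, PySem.Int.floordiv_eq_ediv_of_pos (by omega : (0:Int) < d)]
        exact Int.ediv_nonneg (by positivity) (by omega)
      have hstep1 : 1 ≤ step := by omega
      have hsteplen : step ≤ (arr.length : Int) := by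
        rw [hstepdef, PySem.Int.floordiv_eq_ediv_of_pos (by omega : (0:Int) < d)]
        exact Int.ediv_le_self _ (by positivity)
      rw [PySem.List.foldl_append_singleton_eq_map, List.nil_append]
      have hfun : (fun i => ((PySem.List.pyRange 0 d 1).map
          (fun j => PySem.List.pyGetD arr (PySem.Int.mod (i + j * step) ((arr.length : Int))) 0)).sum)
          = lrsS arr d step := by
        funext i; simp [lrsS, lrsF]
      rw [hfun]
      have hne0 : (PySem.List.pyRange 0 step 1).map (lrsS arr d step) ≠ [] := by
        rw [PySem.List.pyRange_one_cons (by omega : (0 : Int) < step)]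
        simp
      rw [← lrsM_eq_max?_getD _ hne0]
      have hkc : (((arr.length : Int) - step).toNat : Int) = (arr.length : Int) - step :=
        Int.toNat_of_nonneg (by omega)
      have hrange : PySem.List.pyRange step ((arr.length : Int)) 1
          = PySem.List.pyRange step (step + ((((arr.length : Int) - step).toNat : ℕ) : Int)) 1 := by
        rw [hkc]; ring_nf
      rw [hrange]
      rw [lrs_loop arr d step hd hstep1 (((arr.length : Int) - step).toNat) (by rw [hkc]; omega)]
      rw [show step + ((((arr.length : Int) - step).toNat : ℕ) : Int) = (arr.length : Int) by
        rw [hkc]; ring]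

-- ===== VERDICT (by name: the statement is the Claim_ definition above) =====
theorem largest_radial_sum_spec : Claim_equal_largest_radial_sum := by
  intro arr d _ hpre
  exact largest_radial_sum_eq_alt arr d hpre
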